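-- pv_equiv track=rewrite | github.com/bountonw/translate | lo/GC/04_assets/scripts/helpers/md_poetry_to_tex.py | _identify_verse_blocks
-- ===== SOURCE A (Python) =====
-- from typing import Tuple, Dict, List
--
-- def _identify_verse_blocks(lines: List[str]) -> List[Tuple[int, int]]:
--     """
--     Identify start and end indices of verse blocks in the text.
--
--     Helper function to find all blocks of consecutive lines starting with '>'.
--
--     Args:
--         lines: List of text lines
--
--     Returns:
--         List of (start_index, end_index) tuples for verse blocks
--     """
--     blocks = []
--     i = 0
--
--     while i < len(lines):
--         if lines[i].startswith('>'):
--             start = i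
--             # Find end of this block
--             while i < len(lines) and lines[i].startswith('>'):
--                 i += 1
--             blocks.append((start, i))
--         else:
--             i += 1
--
--     return blocks
-- ===== SOURCE B (Python) =====
-- from typing import Tuple, List
--
-- def _identify_verse_blocks(lines: List[str]) -> List[Tuple[int, int]]:
--     blocks = []
--     start = None
--     for i, line in enumerate(lines):
--         if line.startswith('>'):
--             if start is None:
--                 start = i
--         elif start is not None:
--             blocks.append((start, i))
--             start = None
--     if start is not None:
--         blocks.append((start, len(lines)))
--     return blocks
-- ===== Notes on version B (the rewrite author's own statement) =====
-- stated objective: alternative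
-- what changed: Replaces the nested index-jumping while loops with a flat single-pass state machine over enumerate that keeps an optional block-start index and flushes a trailing open block after the loop.
import Mathlib
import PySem

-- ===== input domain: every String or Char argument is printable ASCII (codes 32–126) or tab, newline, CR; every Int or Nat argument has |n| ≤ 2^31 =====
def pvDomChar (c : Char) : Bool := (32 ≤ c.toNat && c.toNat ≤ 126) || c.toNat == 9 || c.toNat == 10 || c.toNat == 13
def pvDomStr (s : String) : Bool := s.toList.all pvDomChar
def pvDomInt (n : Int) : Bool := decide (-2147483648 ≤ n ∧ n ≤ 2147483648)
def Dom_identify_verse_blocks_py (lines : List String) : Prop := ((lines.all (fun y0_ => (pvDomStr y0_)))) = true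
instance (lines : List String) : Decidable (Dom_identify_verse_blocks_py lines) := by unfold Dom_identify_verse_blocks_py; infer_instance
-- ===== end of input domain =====

-- B replaces A's nested index-jumping while loops by a flat single-pass state machine
-- (optional block-start index, flushed after the loop); same cost, different decomposition.

-- ===== PORT A =====
-- lines[i].startswith('>'), used only under the guard i < len(lines) (getD is exact there)
def pvSW (lines : List String) (i : Nat) : Bool :=
  PySem.Str.startswith (lines.getD i "") ">"

-- inner 'while i < len(lines) and lines[i].startswith('>'): i += 1', returning the final i
def aInner (lines : List String) (i : Nat) : Nat :=
  if h : i < lines.length ∧ pvSW lines i then aInner lines (i + 1) else i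
termination_by lines.length - i
decreasing_by omega

theorem aInner_ge (lines : List String) (i : Nat) : i ≤ aInner lines i := by
  unfold aInner
  split
  · have := aInner_ge lines (i + 1); omega
  · omega
termination_by lines.length - i
decreasing_by omega

theorem aInner_lt (lines : List String) (i : Nat)
    (h : i < lines.length ∧ pvSW lines i) : i < aInner lines i := by
  unfold aInner
  rw [dif_pos h]
  have := aInner_ge lines (i + 1)
  omega

-- outer 'while i < len(lines)' with the blocks accumulator
def aLoop (lines : List String) (i : Nat) (blocks : List (Int × Int)) : List (Int × Int) :=
  if h : i < lines.length then
    if hp : pvSW lines i then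
      aLoop lines (aInner lines i) (blocks ++ [((i : Int), (aInner lines i : Int))])
    else
      aLoop lines (i + 1) blocks
  else
    blocks
termination_by lines.length - i
decreasing_by
  · have := aInner_lt lines i ⟨h, hp⟩; omega
  · omega

def identify_verse_blocks_py (lines : List String) : List (Int × Int) :=
  aLoop lines 0 []

-- ===== PORT B =====
-- one step of B's for-loop body: state = (blocks, optional start index)
def bStep (st : List (Int × Int) × Option Int) (p : Int × String) :
    List (Int × Int) × Option Int :=
  if PySem.Str.startswith p.2 ">" then
    match st.2 with
    | none => (st.1, some p.1)
    | some _ => st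
  else
    match st.2 with
    | some s => (st.1 ++ [(s, p.1)], none)
    | none => st

def identify_verse_blocks_py_alt (lines : List String) : List (Int × Int) :=
  let r := (PySem.List.enumerate lines 0).foldl bStep ([], none)
  match r.2 with
  | some s => r.1 ++ [(s, (lines.length : Int))]
  | none => r.1

-- ===== PRECONDITION & SPEC =====
def Spec_identify_verse_blocks_py (lines : List String) (out : List (Int × Int)) : Prop := out = identify_verse_blocks_py_alt lines
instance (lines : List String) (out : List (Int × Int)) : Decidable (Spec_identify_verse_blocks_py lines out) := by unfold Spec_identify_verse_blocks_py; infer_instance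

-- ===== CLAIM (what is proved, stated in full; the proofs are below) =====
def Claim_equal_identify_verse_blocks_py : Prop := ∀ (lines : List String), Dom_identify_verse_blocks_py lines → Spec_identify_verse_blocks_py lines (identify_verse_blocks_py lines)

-- ===== LEMMAS AND PROOFS =====

-- B's post-loop flush
def pvFlush (lines : List String) (st : List (Int × Int) × Option Int) : List (Int × Int) :=
  match st.2 with
  | some s => st.1 ++ [(s, (lines.length : Int))]
  | none => st.1

theorem aInner_step (lines : List String) (i : Nat)
    (h : i < lines.length ∧ pvSW lines i) : aInner lines i = aInner lines (i + 1) := by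
  conv_lhs => rw [aInner]
  rw [dif_pos h]

theorem aInner_eq_self (lines : List String) (i : Nat)
    (h : ¬ (i < lines.length ∧ pvSW lines i)) : aInner lines i = i := by
  conv_lhs => rw [aInner]
  rw [dif_neg h]

-- invariant: folding B's step over the suffix starting at i, then flushing,
-- equals A's outer loop resumed at i (with the start state translated)
theorem pvMain (lines : List String) (i : Nat) (hi : i ≤ lines.length)
    (blocks : List (Int × Int)) (start : Option Int) :
    pvFlush lines (((PySem.List.enumerate (lines.drop i) (i : Int))).foldl bStep (blocks, start)) =
      (match start with
       | none => aLoop lines i blocks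
       | some s => aLoop lines (aInner lines i) (blocks ++ [(s, (aInner lines i : Int))])) := by
  by_cases hlt : i < lines.length
  · rw [List.drop_eq_getElem_cons hlt, PySem.List.enumerate_cons, List.foldl_cons]
    have hget : lines.getD i "" = lines[i] := List.getD_eq_getElem lines "" hlt
    by_cases hp : pvSW lines i
    · have hp' : PySem.Str.startswith lines[i] ">" = true := by rw [← hget]; exact hp
      have hstep : aInner lines i = aInner lines (i + 1) := aInner_step lines i ⟨hlt, hp⟩
      cases start with
      | none =>
        have hrec := pvMain lines (i + 1) (by omega) blocks (some (i : Int))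
        simp only [bStep, hp', if_pos] at *
        have hcast : ((i : Int) + 1) = ((i + 1 : Nat) : Int) := by push_cast; ring
        rw [hcast, hrec]
        conv_rhs => rw [aLoop]
        rw [dif_pos hlt, dif_pos hp, hstep]
      | some s =>
        have hrec := pvMain lines (i + 1) (by omega) blocks (some s)
        simp only [bStep, hp', if_pos] at *
        have hcast : ((i : Int) + 1) = ((i + 1 : Nat) : Int) := by push_cast; ring
        rw [hcast, hrec, hstep]
    · have hp' : PySem.Str.startswith lines[i] ">" = false := by
        rw [← hget]; exact Bool.not_eq_true _ ▸ (by simpa using hp)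
      have heq : aInner lines i = i := aInner_eq_self lines i (by tauto)
      cases start with
      | none =>
        have hrec := pvMain lines (i + 1) (by omega) blocks none
        simp only [bStep, hp', Bool.false_eq_true, if_false] at *
        have hcast : ((i : Int) + 1) = ((i + 1 : Nat) : Int) := by push_cast; ring
        rw [hcast, hrec]
        conv_rhs => rw [aLoop]
        rw [dif_pos hlt, dif_neg (by simpa using hp)]
      | some s =>
        have hrec := pvMain lines (i + 1) (by omega) (blocks ++ [(s, (i : Int))]) none
        simp only [bStep, hp', Bool.false_eq_true, if_false] at *
        have hcast : ((i : Int) + 1) = ((i + 1 : Nat) : Int) := by push_cast; ring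
        rw [hcast, hrec, heq]
        conv_rhs => rw [aLoop]
        rw [dif_pos hlt, dif_neg (by simpa using hp)]
  · have hn : i = lines.length := by omega
    have hdrop : lines.drop i = [] := by simp [hn]
    rw [hdrop, PySem.List.enumerate_nil, List.foldl_nil]
    have haLoop : ∀ b, aLoop lines i b = b := by
      intro b; rw [aLoop, dif_neg hlt]
    cases start with
    | none => simp [pvFlush, haLoop]
    | some s =>
      have heq : aInner lines i = i := aInner_eq_self lines i (by tauto)
      subst hn
      simp only [pvFlush]
      rw [heq, haLoop]
termination_by lines.length - i
decreasing_by all_goals omega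

-- ===== VERDICT (by name: the statement is the Claim_ definition above) =====
theorem identify_verse_blocks_py_spec : Claim_equal_identify_verse_blocks_py := by
  intro lines _
  unfold Spec_identify_verse_blocks_py identify_verse_blocks_py identify_verse_blocks_py_alt
  have h := pvMain lines 0 (by omega) [] none
  simp only [List.drop_zero, Nat.cast_zero] at h
  rw [← h]
  rfl
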